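-- pv_equiv track=rewrite | github.com/winvu88888888-maker/tinnam888888 | test_column_analysis.py | method_trigram
-- ===== SOURCE A (Python) =====
-- from collections import Counter, defaultdict
--
-- def method_transition(history, pos):
--     """Transition matrix: P(next_pos=x | last_pos=y)."""
--     trans = defaultdict(Counter)
--     for i in range(len(history) - 1):
--         trans[history[i][pos]][history[i+1][pos]] += 1
--     last_val = history[-1][pos]
--     if last_val in trans and trans[last_val]:
--         return trans[last_val].most_common(1)[0][0]
--     return last_val
--
-- def method_bigram(history, pos):
--     """2-draw history: P(next | last_2)."""
--     if len(history) < 3: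
--         return history[-1][pos]
--     trans = defaultdict(Counter)
--     for i in range(len(history) - 2):
--         key = (history[i][pos], history[i+1][pos])
--         trans[key][history[i+2][pos]] += 1
--     key = (history[-2][pos], history[-1][pos])
--     if key in trans and trans[key]:
--         return trans[key].most_common(1)[0][0]
--     return method_transition(history, pos)
--
-- def method_trigram(history, pos):
--     """3-draw history pattern."""
--     if len(history) < 4:
--         return history[-1][pos]
--     trans = defaultdict(Counter)
--     for i in range(len(history) - 3):
--         key = (history[i][pos], history[i+1][pos], history[i+2][pos])
--         trans[key][history[i+3][pos]] += 1
--     key = (history[-3][pos], history[-2][pos], history[-1][pos])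
--     if key in trans and trans[key]:
--         return trans[key].most_common(1)[0][0]
--     return method_bigram(history, pos)
-- ===== SOURCE B (Python) =====
-- from collections import Counter
--
-- def _top(counter):
--     return counter.most_common(1)[0][0]
--
-- def method_trigram(history, pos):
--     """Predict next value at column pos: targeted single-Counter passes, no dict-of-Counters."""
--     n = len(history)
--     if n < 4:
--         return history[-1][pos]
--     col = [row[pos] for row in history]
--     c3 = Counter(col[i + 3] for i in range(n - 3)
--                  if (col[i], col[i + 1], col[i + 2]) == (col[-3], col[-2], col[-1]))
--     if c3:
--         return _top(c3)
--     c2 = Counter(col[i + 2] for i in range(n - 2)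
--                  if (col[i], col[i + 1]) == (col[-2], col[-1]))
--     if c2:
--         return _top(c2)
--     c1 = Counter(col[i + 1] for i in range(n - 1) if col[i] == col[-1])
--     if c1:
--         return _top(c1)
--     return history[-1][pos]
-- ===== Notes on version B (the rewrite author's own statement) =====
-- stated objective: simpler
-- what changed: Instead of building a defaultdict-of-Counters over all n-grams at each fallback level, B extracts the column once and, per level, does one targeted filtered pass that counts only the followers of the final key into a single Counter.
import Mathlib
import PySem

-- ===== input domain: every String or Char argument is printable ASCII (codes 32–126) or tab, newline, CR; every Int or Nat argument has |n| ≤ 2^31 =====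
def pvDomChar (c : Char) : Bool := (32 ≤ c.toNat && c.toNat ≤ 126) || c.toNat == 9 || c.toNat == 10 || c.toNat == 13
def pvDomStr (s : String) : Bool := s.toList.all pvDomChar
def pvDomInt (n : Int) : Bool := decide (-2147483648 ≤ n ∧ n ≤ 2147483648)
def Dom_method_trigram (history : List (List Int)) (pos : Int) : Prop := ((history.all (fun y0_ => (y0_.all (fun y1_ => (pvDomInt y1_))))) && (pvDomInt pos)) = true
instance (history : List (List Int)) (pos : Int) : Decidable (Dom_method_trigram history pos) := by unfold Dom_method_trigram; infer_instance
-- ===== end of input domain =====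

-- B replaces A's per-level defaultdict-of-Counters with one column extraction and a single
-- targeted filtered counting pass per fallback level (objective: simpler).


-- ===== PORT A =====
-- history[i][pos] (exact inside Pre_, where both index lookups are in range)
def pvGetRC (history : List (List Int)) (pos i : Int) : Int :=
  (PySem.List.pyGet? (PySem.List.pyGetD history i []) pos).getD 0

-- counter.most_common(1)[0][0]: first item with maximal count in insertion order
-- (heapq.nlargest(1) tie rule = first max); the .getD 0 is only reached on an empty counter,
-- on which neither Python calls most_common
def pvMostCommon1 (c : PySem.Dict Int Int) : Int :=
  ((PySem.List.max? c.items (fun p => p.2)).map (fun p => p.1)).getD 0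

def method_transition (history : List (List Int)) (pos : Int) : Int :=
  let trans := (PySem.List.pyRange 0 ((history.length : Int) - 1) 1).foldl
    (fun t i => t.insert (pvGetRC history pos i)
        ((t.getD (pvGetRC history pos i) PySem.Dict.empty).modify (pvGetRC history pos (i+1)) 0 (· + 1)))
    PySem.Dict.empty
  let lastVal := pvGetRC history pos (-1)
  if trans.contains lastVal = true ∧ (trans.getD lastVal PySem.Dict.empty).items ≠ []
  then pvMostCommon1 (trans.getD lastVal PySem.Dict.empty)
  else lastVal

def method_bigram (history : List (List Int)) (pos : Int) : Int :=
  if (history.length : Int) < 3 then pvGetRC history pos (-1) else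
  let trans := (PySem.List.pyRange 0 ((history.length : Int) - 2) 1).foldl
    (fun t i => t.insert (pvGetRC history pos i, pvGetRC history pos (i+1))
        ((t.getD (pvGetRC history pos i, pvGetRC history pos (i+1)) PySem.Dict.empty).modify (pvGetRC history pos (i+2)) 0 (· + 1)))
    PySem.Dict.empty
  let key := (pvGetRC history pos (-2), pvGetRC history pos (-1))
  if trans.contains key = true ∧ (trans.getD key PySem.Dict.empty).items ≠ []
  then pvMostCommon1 (trans.getD key PySem.Dict.empty)
  else method_transition history pos

def method_trigram (history : List (List Int)) (pos : Int) : Int :=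
  if (history.length : Int) < 4 then pvGetRC history pos (-1) else
  let trans := (PySem.List.pyRange 0 ((history.length : Int) - 3) 1).foldl
    (fun t i => t.insert (pvGetRC history pos i, pvGetRC history pos (i+1), pvGetRC history pos (i+2))
        ((t.getD (pvGetRC history pos i, pvGetRC history pos (i+1), pvGetRC history pos (i+2)) PySem.Dict.empty).modify (pvGetRC history pos (i+3)) 0 (· + 1)))
    PySem.Dict.empty
  let key := (pvGetRC history pos (-3), pvGetRC history pos (-2), pvGetRC history pos (-1))
  if trans.contains key = true ∧ (trans.getD key PySem.Dict.empty).items ≠ []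
  then pvMostCommon1 (trans.getD key PySem.Dict.empty)
  else method_bigram history pos

-- ===== PORT B =====
def method_trigram_alt (history : List (List Int)) (pos : Int) : Int :=
  let n : Int := history.length
  if n < 4 then pvGetRC history pos (-1) else
  let col := history.map (fun row => (PySem.List.pyGet? row pos).getD 0)
  let g := fun (i : Int) => PySem.List.pyGetD col i 0
  let c3 := PySem.Dict.counter (((PySem.List.pyRange 0 (n - 3) 1).filter
      (fun i => (g i, g (i+1), g (i+2)) == (g (-3), g (-2), g (-1)))).map (fun i => g (i+3)))
  if c3.items ≠ [] then pvMostCommon1 c3 else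
  let c2 := PySem.Dict.counter (((PySem.List.pyRange 0 (n - 2) 1).filter
      (fun i => (g i, g (i+1)) == (g (-2), g (-1)))).map (fun i => g (i+2)))
  if c2.items ≠ [] then pvMostCommon1 c2 else
  let c1 := PySem.Dict.counter (((PySem.List.pyRange 0 (n - 1) 1).filter
      (fun i => g i == g (-1))).map (fun i => g (i+1)))
  if c1.items ≠ [] then pvMostCommon1 c1 else
  pvGetRC history pos (-1)

-- ===== PRECONDITION & SPEC =====
-- A raises IndexError on empty history and whenever an accessed row lacks index pos
-- (all rows are accessed when len(history) ≥ 4, only the last row otherwise).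
def Pre_method_trigram (history : List (List Int)) (pos : Int) : Prop :=
  history ≠ [] ∧
  (if 4 ≤ history.length
   then ∀ row ∈ history, PySem.Raise.InRange row.length pos
   else PySem.Raise.InRange (PySem.List.pyGetD history (-1) []).length pos)
instance (history : List (List Int)) (pos : Int) : Decidable (Pre_method_trigram history pos) := by
  unfold Pre_method_trigram; infer_instance

def pvWitness_method_trigram : List (List Int) × Int := ([[1], [2], [3], [1], [2]], 0)

def Spec_method_trigram (history : List (List Int)) (pos : Int) (out : Int) : Prop := out = method_trigram_alt history pos
instance (history : List (List Int)) (pos : Int) (out : Int) : Decidable (Spec_method_trigram history pos out) := by unfold Spec_method_trigram; infer_instance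

-- ===== CLAIM (what is proved, stated in full; the proofs are below) =====
def Claim_equal_method_trigram : Prop := ∀ (history : List (List Int)) (pos : Int), Dom_method_trigram history pos → Pre_method_trigram history pos → Spec_method_trigram history pos (method_trigram history pos)

-- ===== LEMMAS AND PROOFS =====

-- B's column lookup g agrees with A's direct two-step lookup, at every index
lemma g_eq_pvGetRC (history : List (List Int)) (pos i : Int) :
    PySem.List.pyGetD (history.map (fun row => (PySem.List.pyGet? row pos).getD 0)) i 0
      = pvGetRC history pos i := by
  have h := PySem.List.pyGetD_map (fun row => (PySem.List.pyGet? row pos).getD 0) history i ([]:List Int)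
  simpa [pvGetRC, PySem.List.pyGet?, PySem.List.pyIdx?] using h

-- the K-entry of A's grouped-counter fold is the filtered single-counter fold
lemma trans_getD {κ : Type} [BEq κ] [LawfulBEq κ] [DecidableEq κ]
    (keyf : Int → κ) (valf : Int → Int) (K : κ) :
    ∀ (idxs : List Int) (t : PySem.Dict κ (PySem.Dict Int Int)),
    (idxs.foldl (fun t i => t.insert (keyf i)
        ((t.getD (keyf i) PySem.Dict.empty).modify (valf i) 0 (· + 1))) t).getD K PySem.Dict.empty
      = idxs.foldl (fun c i => if keyf i = K then c.modify (valf i) 0 (· + 1) else c)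
          (t.getD K PySem.Dict.empty) := by
  intro idxs
  induction idxs with
  | nil => intro t; simp
  | cons i rest ih =>
    intro t
    simp only [List.foldl_cons]
    rw [ih]
    congr 1
    rw [PySem.Dict.getD_insert]
    by_cases h : keyf i = K
    · simp [h]
    · simp [h, Ne.symm h]

-- hence it equals B's Counter of the followers of the matching positions
lemma level_eq {κ : Type} [BEq κ] [LawfulBEq κ] [DecidableEq κ]
    (keyf : Int → κ) (valf : Int → Int) (K : κ) (idxs : List Int) :
    (idxs.foldl (fun t i => t.insert (keyf i)
        ((t.getD (keyf i) PySem.Dict.empty).modify (valf i) 0 (· + 1))) PySem.Dict.empty).getD K PySem.Dict.empty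
      = PySem.Dict.counter ((idxs.filter (fun i => keyf i == K)).map valf) := by
  rw [trans_getD keyf valf K idxs PySem.Dict.empty]
  rw [PySem.Dict.counter_eq_foldl, List.foldl_map, List.foldl_filter]
  simp [beq_iff_eq]

-- Python's 'key in trans and trans[key]' is just nonemptiness of the key's entry
lemma cond_iff {κ : Type} [BEq κ] [LawfulBEq κ]
    (d : PySem.Dict κ (PySem.Dict Int Int)) (K : κ) :
    (d.contains K = true ∧ (d.getD K PySem.Dict.empty).items ≠ []) ↔
      (d.getD K PySem.Dict.empty).items ≠ [] := by
  constructor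
  · exact fun h => h.2
  · intro h
    refine ⟨?_, h⟩
    by_contra hc
    have hf : d.contains K = false := by simpa using hc
    rw [PySem.Dict.getD_of_not_contains d _ hf] at h
    exact h rfl

-- ===== VERDICT (by name: the statement is the Claim_ definition above) =====
theorem method_trigram_spec : Claim_equal_method_trigram := by
  intro history pos _dom _pre
  unfold Spec_method_trigram
  simp only [method_trigram, method_trigram_alt]
  by_cases h4 : (history.length : Int) < 4
  · simp [h4]
  · have h3 : ¬ (history.length : Int) < 3 := by omega
    simp only [h4, h3, if_false, method_bigram, method_transition, g_eq_pvGetRC]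
    simp only [cond_iff]
    simp only [level_eq]
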